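-- pv_equiv track=rewrite | github.com/JackKing805/WorkFlowTool | python_detector/detect_icons.py | erode
-- ===== SOURCE A (Python) =====
-- from typing import Any, Dict, Iterable, List, Optional, Sequence, Tuple
--
-- def erode(mask: Sequence[bool], width: int, height: int) -> List[bool]:
--     output = [False] * (width * height)
--     for y in range(height):
--         for x in range(width):
--             index = y * width + x
--             if not mask[index]:
--                 continue
--             if all(mask[ny * width + nx] for nx, ny in neighbors8(x, y, width, height)):
--                 output[index] = True
--     return output
--
-- def neighbors8(x: int, y: int, width: int, height: int) -> Iterable[Tuple[int, int]]:
--     for ny in range(max(0, y - 1), min(height, y + 2)):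
--         for nx in range(max(0, x - 1), min(width, x + 2)):
--             if nx == x and ny == y:
--                 continue
--             yield nx, ny
-- ===== SOURCE B (Python) =====
-- def erode(mask, width, height):
--     # Separable 3x3 erosion: a clipped 1x3 horizontal pass, then a clipped 3x1
--     # vertical pass over it, equals the AND over the whole clipped 3x3 block
--     # (= center AND its 8 neighbors).
--     horiz = [
--         all(mask[y * width + nx] for nx in range(max(0, x - 1), min(width, x + 2)))
--         for y in range(height) for x in range(width)
--     ]
--     return [
--         all(horiz[ny * width + x] for ny in range(max(0, y - 1), min(height, y + 2)))
--         for y in range(height) for x in range(width)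
--     ]
-- ===== Notes on version B (the rewrite author's own statement) =====
-- stated objective: alternative
-- what changed: Replaces the per-pixel 8-neighbor generator scan with a separable two-pass erosion: a clipped 1x3 horizontal AND pass producing an intermediate grid, then a clipped 3x1 vertical AND pass over it, exploiting that the 3x3 block structuring element factors into a row and a column.
-- outside the precondition, e.g. on erode([], -1, -1): A returns [False], B returns []
import Mathlib
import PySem

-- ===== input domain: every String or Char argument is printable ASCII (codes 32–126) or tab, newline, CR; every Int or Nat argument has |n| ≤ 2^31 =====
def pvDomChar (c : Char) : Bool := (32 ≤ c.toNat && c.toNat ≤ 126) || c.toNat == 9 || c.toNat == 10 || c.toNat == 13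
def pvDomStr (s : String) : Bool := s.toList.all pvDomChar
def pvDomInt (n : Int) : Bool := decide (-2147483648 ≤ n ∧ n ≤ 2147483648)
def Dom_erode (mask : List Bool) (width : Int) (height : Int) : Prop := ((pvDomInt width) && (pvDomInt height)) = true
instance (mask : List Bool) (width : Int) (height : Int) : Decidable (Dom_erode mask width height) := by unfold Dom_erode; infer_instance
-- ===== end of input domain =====

-- B replaces A's per-pixel 8-neighbor scan by a separable two-pass erosion
-- (clipped 1x3 horizontal AND pass, then clipped 3x1 vertical AND pass over it).


-- ===== PORT A =====
-- neighbors8: the generator's yielded pairs, in order ('continue' skips the center).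
def pyNeighbors8 (x y width height : Int) : List (Int × Int) :=
  (PySem.List.pyRange (max 0 (y - 1)) (min height (y + 2)) 1).flatMap (fun ny =>
    (PySem.List.pyRange (max 0 (x - 1)) (min width (x + 2)) 1).flatMap (fun nx =>
      if nx = x ∧ ny = y then [] else [(nx, ny)]))

-- mask[index] is ported as PySem.List.pyGetD mask index false: an out-of-range index
-- (Python IndexError) is excluded by Pre_erode; all indices reached are nonnegative.
def erode (mask : List Bool) (width : Int) (height : Int) : List Bool :=
  (PySem.List.pyRange 0 height 1).foldl (fun output y =>
    (PySem.List.pyRange 0 width 1).foldl (fun output x =>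
      let index := y * width + x
      if PySem.List.pyGetD mask index false = false then output
      else if (pyNeighbors8 x y width height).all
          (fun p => PySem.List.pyGetD mask (p.2 * width + p.1) false)
        then output.set index.toNat true
        else output)
      output)
    (List.replicate (width * height).toNat false)

-- ===== PORT B =====
-- first comprehension of Source B: clipped 1x3 horizontal AND pass
def erodeHoriz (mask : List Bool) (width : Int) (height : Int) : List Bool :=
  (PySem.List.pyRange 0 height 1).flatMap (fun y =>
    (PySem.List.pyRange 0 width 1).map (fun x =>
      (PySem.List.pyRange (max 0 (x - 1)) (min width (x + 2)) 1).all (fun nx =>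
        PySem.List.pyGetD mask (y * width + nx) false)))

-- second comprehension of Source B: clipped 3x1 vertical AND pass over the first
def erode_alt (mask : List Bool) (width : Int) (height : Int) : List Bool :=
  let horiz := erodeHoriz mask width height
  (PySem.List.pyRange 0 height 1).flatMap (fun y =>
    (PySem.List.pyRange 0 width 1).map (fun x =>
      (PySem.List.pyRange (max 0 (y - 1)) (min height (y + 2)) 1).all (fun ny =>
        PySem.List.pyGetD horiz (ny * width + x) false)))

-- ===== PRECONDITION & SPEC =====
-- Pre_ excludes (a) masks shorter than width*height when both dimensions are positive,
-- where Python A raises IndexError, and (b) the nonsense corner width<0 ∧ height<0,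
-- outside the natural domain, where A's nonempty all-False output (of length
-- width*height > 0) is an accident of '[False] * (width * height)' and B returns [].
def Pre_erode (mask : List Bool) (width : Int) (height : Int) : Prop :=
  ¬ (width < 0 ∧ height < 0) ∧ (0 < width → 0 < height → width * height ≤ (mask.length : Int))
instance (mask : List Bool) (width : Int) (height : Int) : Decidable (Pre_erode mask width height) := by unfold Pre_erode; infer_instance

def pvWitness_erode : List Bool × Int × Int :=
  ([true, true, true, true, true, true, false, true, true], 3, 3)

def Spec_erode (mask : List Bool) (width : Int) (height : Int) (out : List Bool) : Prop := out = erode_alt mask width height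
instance (mask : List Bool) (width : Int) (height : Int) (out : List Bool) : Decidable (Spec_erode mask width height out) := by unfold Spec_erode; infer_instance

-- ===== CLAIM (what is proved, stated in full; the proofs are below) =====
def Claim_equal_erode : Prop := ∀ (mask : List Bool) (width : Int) (height : Int), Dom_erode mask width height → Pre_erode mask width height → Spec_erode mask width height (erode mask width height)

-- ===== LEMMAS AND PROOFS =====

-- the Boolean A computes for pixel (x, y): center AND its yielded 8 neighbors
def condA (mask : List Bool) (width height x y : Int) : Bool :=
  PySem.List.pyGetD mask (y * width + x) false &&
    (pyNeighbors8 x y width height).all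
      (fun p => PySem.List.pyGetD mask (p.2 * width + p.1) false)

-- B's horizontal-pass value at (x, y)
def rowAnd (mask : List Bool) (width : Int) (y x : Int) : Bool :=
  (PySem.List.pyRange (max 0 (x - 1)) (min width (x + 2)) 1).all (fun nx =>
    PySem.List.pyGetD mask (y * width + nx) false)

-- the AND over the whole clipped 3x3 block at (x, y)
def blockAnd (mask : List Bool) (width height : Int) (y x : Int) : Bool :=
  (PySem.List.pyRange (max 0 (y - 1)) (min height (y + 2)) 1).all (fun ny =>
    rowAnd mask width ny x)

-- the loop body of A, named for the fold characterization
def stepA (mask : List Bool) (width height : Int) (o : List Bool) (y x : Int) : List Bool :=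
  if PySem.List.pyGetD mask (y * width + x) false = false then o
  else if (pyNeighbors8 x y width height).all
      (fun p => PySem.List.pyGetD mask (p.2 * width + p.1) false)
    then o.set (y * width + x).toNat true
    else o

theorem all_congr_mem {α : Type} (l : List α) (f g : α → Bool)
    (h : ∀ x ∈ l, f x = g x) : l.all f = l.all g := by
  induction l with
  | nil => rfl
  | cons a t ih =>
    simp only [List.all_cons, h a (by simp),
      ih (fun x hx => h x (List.mem_cons_of_mem a hx))]

theorem pyRange_zero_map (k : Int) (hk : 0 ≤ k) :
    PySem.List.pyRange 0 k 1 = List.map (fun j : Nat => (j : Int)) (List.range k.toNat) := by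
  conv_lhs => rw [← Int.toNat_of_nonneg hk]
  exact PySem.List.pyRange_zero_natCast k.toNat

-- center ∧ 8 neighbors = AND over the whole clipped 3x3 block
theorem condA_eq_blockAnd (mask : List Bool) (width height x y : Int)
    (hx0 : 0 ≤ x) (hxw : x < width) (hy0 : 0 ≤ y) (hyh : y < height) :
    condA mask width height x y = blockAnd mask width height y x := by
  rw [Bool.eq_iff_iff]
  simp only [condA, blockAnd, rowAnd, pyNeighbors8, List.all_eq_true, List.mem_flatMap,
    PySem.List.mem_pyRange_one, Bool.and_eq_true, List.mem_ite_nil_left, List.mem_singleton]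
  constructor
  · rintro ⟨hc, hn⟩ ny ⟨h1, h2⟩ nx ⟨h3, h4⟩
    by_cases hcen : nx = x ∧ ny = y
    · obtain ⟨rfl, rfl⟩ := hcen; exact hc
    · exact hn (nx, ny) ⟨ny, ⟨h1, h2⟩, nx, ⟨h3, h4⟩, hcen, rfl⟩
  · intro h
    refine ⟨h y ⟨by omega, by omega⟩ x ⟨by omega, by omega⟩, ?_⟩
    rintro ⟨nx, ny⟩ ⟨ny', hb1, nx', hb2, hne, heq⟩
    injection heq with e1 e2
    subst e1; subst e2
    exact h _ hb1 _ hb2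

-- grid flattening: a flatMap of maps over ranges is one map over range (H*W)
theorem grid_flatMap {α : Type} (H W : Nat) (g : Nat → Nat → α) (hW : 0 < W) :
    (List.range H).flatMap (fun y => (List.range W).map (fun x => g y x))
      = (List.range (H * W)).map (fun i => g (i / W) (i % W)) := by
  induction H with
  | zero => simp
  | succ H ih =>
    rw [List.range_succ, List.flatMap_append, ih, Nat.succ_mul, List.range_add,
      List.map_append, List.flatMap_cons, List.flatMap_nil, List.append_nil, List.map_map]
    congr 1
    apply List.map_congr_left
    intro a ha
    rw [List.mem_range] at ha
    have h1 : (H * W + a) / W = H := by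
      rw [Nat.mul_comm, Nat.mul_add_div hW, Nat.div_eq_of_lt ha, Nat.add_zero]
    have h2 : (H * W + a) % W = a := by
      rw [Nat.mul_comm H W, Nat.mul_add_mod, Nat.mod_eq_of_lt ha]
    simp [h1, h2]

theorem erode_alt_char (mask : List Bool) (width height : Int)
    (hw : 0 < width) (hh : 0 < height) :
    erode_alt mask width height
      = (List.range (height.toNat * width.toNat)).map (fun i =>
          blockAnd mask width height (↑(i / width.toNat)) (↑(i % width.toNat))) := by
  have hw' : 0 < width.toNat := by omega
  have hwn : (width.toNat : Int) = width := Int.toNat_of_nonneg hw.le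
  have hhoriz : erodeHoriz mask width height
      = (List.range (height.toNat * width.toNat)).map (fun i =>
          rowAnd mask width (↑(i / width.toNat)) (↑(i % width.toNat))) := by
    unfold erodeHoriz
    rw [pyRange_zero_map width hw.le, pyRange_zero_map height hh.le, List.flatMap_map]
    simp only [List.map_map, Function.comp_def]
    rw [grid_flatMap _ _ _ hw']
    rfl
  unfold erode_alt
  rw [hhoriz, pyRange_zero_map width hw.le, pyRange_zero_map height hh.le, List.flatMap_map]
  simp only [List.map_map, Function.comp_def]
  rw [grid_flatMap _ _ _ hw']
  apply List.map_congr_left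
  intro i hi
  rw [List.mem_range] at hi
  simp only [blockAnd]
  apply all_congr_mem
  intro ny hny
  rw [PySem.List.mem_pyRange_one] at hny
  have hny0 : 0 ≤ ny := le_trans (le_max_left _ _) hny.1
  have hnyh : ny < height := lt_of_lt_of_le hny.2 (min_le_left _ _)
  have hx : i % width.toNat < width.toNat := Nat.mod_lt i hw'
  have hidx : ny * width + (↑(i % width.toNat) : Int)
      = ((ny.toNat * width.toNat + i % width.toNat : Nat) : Int) := by
    push_cast
    rw [Int.toNat_of_nonneg hny0, hwn]
  rw [hidx, PySem.List.pyGetD_natCast, PySem.List.getD_map_range]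
  · have h1 : (ny.toNat * width.toNat + i % width.toNat) / width.toNat = ny.toNat := by
      rw [Nat.mul_comm, Nat.mul_add_div hw', Nat.div_eq_of_lt hx, Nat.add_zero]
    have h2 : (ny.toNat * width.toNat + i % width.toNat) % width.toNat = i % width.toNat := by
      rw [Nat.mul_comm ny.toNat width.toNat, Nat.mul_add_mod, Nat.mod_eq_of_lt hx]
    rw [h1, h2, Int.toNat_of_nonneg hny0]
  · have hnyt : ny.toNat < height.toNat := by omega
    calc ny.toNat * width.toNat + i % width.toNat
        < (ny.toNat + 1) * width.toNat := by rw [Nat.succ_mul]; omega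
      _ ≤ height.toNat * width.toNat := Nat.mul_le_mul_right _ (by omega)

theorem stepA_length (mask : List Bool) (width height : Int) (o : List Bool) (y x : Int) :
    (stepA mask width height o y x).length = o.length := by
  unfold stepA
  split
  · rfl
  · split
    · exact List.length_set ..
    · rfl

theorem foldl_nested {α β σ : Type} (ys : List α) (xs : List β) (f : σ → α → β → σ) (init : σ) :
    ys.foldl (fun o y => xs.foldl (fun o' x => f o' y x) o) init
      = (ys.flatMap (fun y => xs.map (fun x => (y, x)))).foldl (fun o p => f o p.1 p.2) init := by
  induction ys generalizing init with
  | nil => rfl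
  | cons a t ih =>
    simp only [List.foldl_cons, List.flatMap_cons, List.foldl_append, List.foldl_map, ih]

theorem foldA_length (mask : List Bool) (width height : Int) (l : List Nat) :
    ∀ (o : List Bool),
      (l.foldl (fun o i => stepA mask width height o (↑(i / width.toNat)) (↑(i % width.toNat))) o).length
        = o.length := by
  induction l with
  | nil => intro o; rfl
  | cons a t ih => intro o; rw [List.foldl_cons, ih, stepA_length]

theorem foldA_char (mask : List Bool) (width height : Int)
    (hw : 0 < width) (m : Nat)
    (hm : m ≤ height.toNat * width.toNat) :
    ∀ i, i < height.toNat * width.toNat →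
      ((List.range m).foldl
          (fun o j => stepA mask width height o (↑(j / width.toNat)) (↑(j % width.toNat)))
          (List.replicate (height.toNat * width.toNat) false))[i]?
        = some (if i < m then condA mask width height (↑(i % width.toNat)) (↑(i / width.toNat)) else false) := by
  have hw' : 0 < width.toNat := by omega
  have hwn : (width.toNat : Int) = width := Int.toNat_of_nonneg hw.le
  induction m with
  | zero =>
    intro i hi
    simp [hi]
  | succ m ih =>
    intro i hi
    rw [List.range_succ, List.foldl_append, List.foldl_cons, List.foldl_nil]
    have hlen : ((List.range m).foldl
        (fun o j => stepA mask width height o (↑(j / width.toNat)) (↑(j % width.toNat)))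
        (List.replicate (height.toNat * width.toNat) false)).length
        = height.toNat * width.toNat := by
      rw [foldA_length, List.length_replicate]
    have hidx : ((m / width.toNat : Nat) : Int) * width + ((m % width.toNat : Nat) : Int) = (m : Int) := by
      rw [← hwn]
      push_cast
      rw [mul_comm]
      exact_mod_cast Nat.div_add_mod m width.toNat
    have hprev := ih (by omega) i hi
    rw [stepA, hidx]
    by_cases hcase : i = m
    · subst hcase
      rw [if_neg (by omega)] at hprev
      rw [if_pos (Nat.lt_succ_self i)]
      split_ifs with h1 h2
      · rw [hprev]
        simp only [condA]
        rw [hidx, h1, Bool.false_and]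
      · rw [Int.toNat_natCast, List.getElem?_set_self (by omega)]
        simp only [Bool.not_eq_false] at h1
        simp only [condA]
        rw [hidx, h1, Bool.true_and, h2]
      · simp only [Bool.not_eq_true] at h2
        rw [hprev]
        simp only [condA]
        rw [hidx, h2, Bool.and_false]
    · have hiff : (i < m + 1) ↔ (i < m) := by omega
      rw [if_congr hiff rfl rfl, ← hprev]
      split_ifs with h1 h2
      · rfl
      · rw [Int.toNat_natCast]
        exact List.getElem?_set_ne (by omega)
      · rfl

theorem erode_char (mask : List Bool) (width height : Int)
    (hw : 0 < width) (hh : 0 < height) :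
    erode mask width height
      = (List.range (height.toNat * width.toNat)).map (fun i =>
          condA mask width height (↑(i % width.toNat)) (↑(i / width.toNat))) := by
  have hw' : 0 < width.toNat := by omega
  have hwn : (width.toNat : Int) = width := Int.toNat_of_nonneg hw.le
  have hhn : (height.toNat : Int) = height := Int.toNat_of_nonneg hh.le
  have hn : (width * height).toNat = height.toNat * width.toNat := by
    have h : width * height = ((height.toNat * width.toNat : Nat) : Int) := by
      rw [Nat.cast_mul, hwn, hhn, mul_comm]
    rw [h, Int.toNat_natCast]
  unfold erode
  rw [foldl_nested, pyRange_zero_map height hh.le, pyRange_zero_map width hw.le,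
    List.flatMap_map]
  simp only [List.map_map, Function.comp_def]
  rw [grid_flatMap _ _ _ hw', List.foldl_map, hn]
  show (List.range (height.toNat * width.toNat)).foldl
      (fun o j => stepA mask width height o (↑(j / width.toNat)) (↑(j % width.toNat)))
      (List.replicate (height.toNat * width.toNat) false) = _
  apply List.ext_getElem?
  intro i
  by_cases hi : i < height.toNat * width.toNat
  · rw [foldA_char mask width height hw _ le_rfl i hi, if_pos hi]
    simp [hi]
  · rw [List.getElem?_eq_none, List.getElem?_eq_none]
    · simpa using by omega
    · rw [foldA_length, List.length_replicate]; omega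

-- ===== VERDICT (by name: the statement is the Claim_ definition above) =====
theorem erode_spec : Claim_equal_erode := by
  intro mask width height _hdom hpre
  unfold Spec_erode
  by_cases hw : 0 < width
  · by_cases hh : 0 < height
    · rw [erode_char mask width height hw hh, erode_alt_char mask width height hw hh]
      apply List.map_congr_left
      intro i hi
      rw [List.mem_range] at hi
      have hw' : 0 < width.toNat := by omega
      have hdiv : i / width.toNat < height.toNat :=
        Nat.div_lt_of_lt_mul (Nat.mul_comm height.toNat width.toNat ▸ hi)
      have hwn : (width.toNat : Int) = width := Int.toNat_of_nonneg (le_of_lt hw)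
      have hhn : (height.toNat : Int) = height := Int.toNat_of_nonneg (le_of_lt hh)
      refine condA_eq_blockAnd mask width height _ _ (by positivity) ?_ (by positivity) ?_
      · rw [← hwn]; exact_mod_cast Nat.mod_lt i hw'
      · rw [← hhn]; exact_mod_cast hdiv
    · have hhle : height ≤ 0 := by omega
      have hprod : width * height ≤ 0 := mul_nonpos_of_nonneg_of_nonpos hw.le hhle
      unfold erode erode_alt erodeHoriz
      rw [PySem.List.pyRange_one_eq_nil hhle]
      simp [Int.toNat_of_nonpos hprod]
  · have hwle : width ≤ 0 := by omega
    have hprod : width * height ≤ 0 := by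
      by_cases h0 : width = 0
      · rw [h0, zero_mul]
      · have hge : 0 ≤ height := by
          by_contra hneg
          exact hpre.1 ⟨by omega, by omega⟩
        exact mul_nonpos_of_nonpos_of_nonneg hwle hge
    unfold erode erode_alt erodeHoriz
    rw [PySem.List.pyRange_one_eq_nil hwle]
    simp [Int.toNat_of_nonpos hprod]
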